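-- pv_equiv track=rewrite | github.com/abdodakir/recherche-d-image | tp1.py | CalcOccu
-- ===== SOURCE A (Python) =====
-- def CalcOccu(mat):
--     dictio = {}
--     for i in range(len(mat)-1):
--         for j in range(len(mat[i])-1):
--
--             if dictio.get(mat[i][j]):
--                 if dictio[mat[i][j]].get(mat[i+1][j+1]):
--                     dictio[mat[i][j]][mat[i+1][j+1]] += 1
--                 else:
--                     dictio[mat[i][j]][mat[i+1][j+1]] = 1
--             else:
--                 dictio[mat[i][j]] ={mat[i+1][j+1]:1}
--     return dictio
-- ===== SOURCE B (Python) =====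
-- def CalcOccu(mat):
--     # Sort-then-scan: collect the diagonal pairs, sort them, run-length encode the
--     # sorted list to get each pair's multiplicity, then lay the counts out in
--     # first-occurrence order as the nested dict.
--     pairs = [(mat[i][j], mat[i + 1][j + 1])
--              for i in range(len(mat) - 1) for j in range(len(mat[i]) - 1)]
--     spairs = sorted(pairs)
--     counts = {}
--     i = 0
--     while i < len(spairs):
--         j = i
--         while j < len(spairs) and spairs[j] == spairs[i]:
--             j += 1
--         counts[spairs[i]] = j - i
--         i = j
--     result = {}
--     for a, b in dict.fromkeys(pairs):
--         result.setdefault(a, {})[b] = counts[a, b]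
--     return result
-- ===== Notes on version B (the rewrite author's own statement) =====
-- stated objective: alternative
-- what changed: A builds the nested dict-of-dicts by branching mutation inside the double index loop; B instead materializes the flat list of diagonal pairs, sorts it, run-length-encodes the sorted list to get each pair's multiplicity, and finally lays those counts out in first-occurrence order as the nested dict.
import Mathlib
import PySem

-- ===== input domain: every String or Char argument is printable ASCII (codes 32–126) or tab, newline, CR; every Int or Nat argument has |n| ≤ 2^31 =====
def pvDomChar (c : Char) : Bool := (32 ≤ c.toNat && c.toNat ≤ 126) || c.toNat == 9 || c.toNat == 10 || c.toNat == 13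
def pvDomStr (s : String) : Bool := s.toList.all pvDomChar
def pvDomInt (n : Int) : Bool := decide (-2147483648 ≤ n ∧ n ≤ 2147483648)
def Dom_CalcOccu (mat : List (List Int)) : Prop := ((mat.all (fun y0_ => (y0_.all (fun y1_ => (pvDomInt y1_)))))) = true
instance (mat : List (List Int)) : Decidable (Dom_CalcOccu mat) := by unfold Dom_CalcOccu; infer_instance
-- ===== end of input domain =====

-- B replaces A's incremental nested-dict mutation by sort-then-scan: collect the diagonal
-- pairs, sort them, run-length-encode the multiplicities, then lay them out in
-- first-occurrence order (objective: alternative, not faster).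

-- ===== PORT A =====
-- literal port of A: builds the nested dict incrementally inside the double index loop.
-- Indexing uses pyGetD; within Pre_CalcOccu every access is in range, so this is exact there.
def CalcOccu (mat : List (List Int)) : List (Int × List (Int × Int)) :=
  let dictio :=
    (PySem.List.pyRange 0 (PySem.List.len mat - 1) 1).foldl (fun dictio i =>
      (PySem.List.pyRange 0 (PySem.List.len (PySem.List.pyGetD mat i []) - 1) 1).foldl
        (fun dictio j =>
          let a := PySem.List.pyGetD (PySem.List.pyGetD mat i []) j 0
          let b := PySem.List.pyGetD (PySem.List.pyGetD mat (i + 1) []) (j + 1) 0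
          match dictio.get? a with
          | some inner =>
            -- Python truthiness: `if dictio.get(k)` is the inner dict being nonempty
            if inner.size ≠ 0 then
              match inner.get? b with
              | some c =>
                -- Python truthiness: `if dictio[k].get(b)` is the count being nonzero
                if c ≠ 0 then dictio.insert a (inner.insert b (c + 1))
                else dictio.insert a (inner.insert b 1)
              | none => dictio.insert a (inner.insert b 1)
            else dictio.insert a (PySem.Dict.ofList [(b, 1)])
          | none => dictio.insert a (PySem.Dict.ofList [(b, 1)]))
        dictio)
      (PySem.Dict.empty : PySem.Dict Int (PySem.Dict Int Int))
  dictio.items.map (fun p => (p.1, p.2.items))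

-- ===== PORT B =====
-- port of B's run-length while loop: one step consumes the run equal to the head
-- (Python's inner `while spairs[j] == spairs[i]` is the takeWhile over the tail)
def pvRunLenAux (acc : PySem.Dict (Int × Int) Int) :
    List (Int × Int) → PySem.Dict (Int × Int) Int
  | [] => acc
  | x :: xs =>
      pvRunLenAux (acc.insert x (((xs.takeWhile (fun y => y == x)).length : Int) + 1))
        (xs.dropWhile (fun y => y == x))
  termination_by l => l.length
  decreasing_by simpa using Nat.lt_succ_of_le (List.length_dropWhile_le _ _)

-- literal port of B (Source B): pair comprehension, sorted(), run-length counts, reshape.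
-- `counts[a, b]` cannot raise KeyError (every deduped pair occurs in spairs), so the
-- total lookup `getD p 0` is exact there.
def CalcOccu_alt (mat : List (List Int)) : List (Int × List (Int × Int)) :=
  let pairs :=
    (PySem.List.pyRange 0 (PySem.List.len mat - 1) 1).flatMap (fun i =>
      (PySem.List.pyRange 0 (PySem.List.len (PySem.List.pyGetD mat i []) - 1) 1).map (fun j =>
        (PySem.List.pyGetD (PySem.List.pyGetD mat i []) j 0,
         PySem.List.pyGetD (PySem.List.pyGetD mat (i + 1) []) (j + 1) 0)))
  let spairs := PySem.List.sorted2 pairs (fun p => p.1) (fun p => p.2)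
  let counts := pvRunLenAux PySem.Dict.empty spairs
  let result :=
    (PySem.List.dedup pairs).foldl
      (fun (result : PySem.Dict Int (PySem.Dict Int Int)) p =>
        result.insert p.1
          (((result.get? p.1).getD PySem.Dict.empty).insert p.2 (counts.getD p 0)))
      PySem.Dict.empty
  result.items.map (fun q => (q.1, q.2.items))

-- ===== PRECONDITION & SPEC =====
-- Pre_ excludes exactly the ragged matrices on which the Python A (and B alike) raises
-- IndexError reading mat[i+1][j+1]; on rectangular-enough input both return normally.
def Pre_CalcOccu (mat : List (List Int)) : Prop :=
  ∀ i < mat.length - 1, 2 ≤ (mat[i]!).length → (mat[i]!).length ≤ (mat[i + 1]!).length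
instance (mat : List (List Int)) : Decidable (Pre_CalcOccu mat) := by
  unfold Pre_CalcOccu; infer_instance

def pvWitness_CalcOccu : List (List Int) := [[1, 2], [3, 4]]

def Spec_CalcOccu (mat : List (List Int)) (out : List (Int × List (Int × Int))) : Prop := out = CalcOccu_alt mat
instance (mat : List (List Int)) (out : List (Int × List (Int × Int))) : Decidable (Spec_CalcOccu mat out) := by unfold Spec_CalcOccu; infer_instance

-- ===== CLAIM (what is proved, stated in full; the proofs are below) =====
def Claim_equal_CalcOccu : Prop := ∀ (mat : List (List Int)), Dom_CalcOccu mat → Pre_CalcOccu mat → Spec_CalcOccu mat (CalcOccu mat)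

-- ===== LEMMAS AND PROOFS =====

-- the stream of diagonal pairs both programs traverse, flattened
def pvPairs (mat : List (List Int)) : List (Int × Int) :=
  (PySem.List.pyRange 0 (PySem.List.len mat - 1) 1).flatMap (fun i =>
    (PySem.List.pyRange 0 (PySem.List.len (PySem.List.pyGetD mat i []) - 1) 1).map (fun j =>
      (PySem.List.pyGetD (PySem.List.pyGetD mat i []) j 0,
       PySem.List.pyGetD (PySem.List.pyGetD mat (i + 1) []) (j + 1) 0)))

def pvStepA (dictio : PySem.Dict Int (PySem.Dict Int Int)) (p : Int × Int) :
    PySem.Dict Int (PySem.Dict Int Int) :=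
  match dictio.get? p.1 with
  | some inner =>
    if inner.size ≠ 0 then
      match inner.get? p.2 with
      | some c =>
        if c ≠ 0 then dictio.insert p.1 (inner.insert p.2 (c + 1))
        else dictio.insert p.1 (inner.insert p.2 1)
      | none => dictio.insert p.1 (inner.insert p.2 1)
    else dictio.insert p.1 (PySem.Dict.ofList [(p.2, 1)])
  | none => dictio.insert p.1 (PySem.Dict.ofList [(p.2, 1)])

def pvInner (ps : List (Int × Int)) (a : Int) : PySem.Dict Int Int :=
  ⟨(PySem.List.dedup ((ps.filter (fun p => p.1 == a)).map (·.2))).map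
      (fun b => (b, (ps.count (a, b) : Int)))⟩

def pvSpec (ps : List (Int × Int)) : PySem.Dict Int (PySem.Dict Int Int) :=
  ⟨(PySem.List.dedup (ps.map (·.1))).map (fun a => (a, pvInner ps a))⟩

theorem pvGet?_mk_map {κ ν : Type} [BEq κ] [LawfulBEq κ] (xs : List κ) (g : κ → ν) (x : κ)
    (h : xs.Nodup) :
    (PySem.Dict.mk (xs.map fun a => (a, g a))).get? x = if x ∈ xs then some (g x) else none := by
  induction xs with
  | nil => simp [PySem.Dict.get?]
  | cons y ys ih =>
    rcases List.nodup_cons.mp h with ⟨hy, hys⟩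
    simp only [List.map_cons, PySem.Dict.get?_mk_cons]
    by_cases hxy : y = x
    · subst hxy; simp
    · simp [hxy, ih hys, Ne.symm hxy]

theorem pvContains_mk_map {κ ν : Type} [BEq κ] [LawfulBEq κ] (xs : List κ) (g : κ → ν) (x : κ)
    (h : xs.Nodup) :
    (PySem.Dict.mk (xs.map fun a => (a, g a))).contains x = decide (x ∈ xs) := by
  rw [PySem.Dict.contains_eq_isSome_get?, pvGet?_mk_map xs g x h]
  by_cases hx : x ∈ xs <;> simp [hx]

theorem pvMem_inner (ps : List (Int × Int)) (a b : Int) :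
    b ∈ PySem.List.dedup ((ps.filter (fun r => r.1 == a)).map (·.2)) ↔ (a, b) ∈ ps := by
  simp only [PySem.List.dedup_eq_ofList, PySem.Set.mem_ofList, List.mem_map, List.mem_filter,
    beq_iff_eq]
  constructor
  · rintro ⟨r, ⟨hr, h1⟩, h2⟩; rwa [show (a, b) = r from (Prod.ext h1 h2).symm]
  · intro hp; exact ⟨(a, b), ⟨hp, rfl⟩, rfl⟩

theorem pvInner_append_of_ne (ps : List (Int × Int)) (p : Int × Int) (a : Int)
    (hne : p.1 ≠ a) : pvInner (ps ++ [p]) a = pvInner ps a := by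
  unfold pvInner
  have hf : (ps ++ [p]).filter (fun r => r.1 == a) = ps.filter (fun r => r.1 == a) := by
    simp [List.filter_append,
      show (p.1 == a) = false by simpa using hne]
  rw [hf]
  congr 1
  apply List.map_congr_left
  intro b hb
  have : (ps ++ [p]).count (a, b) = ps.count (a, b) := by
    rw [List.count_append]
    simp only [List.count_singleton]
    rw [show (p == (a, b)) = false by
      simp only [beq_eq_false_iff_ne, ne_eq]
      exact fun h' => hne (by rw [h'])]
    simp
  rw [this]

theorem pvSpec_insert (ps : List (Int × Int)) (p : Int × Int) :
    (pvSpec ps).insert p.1 (pvInner (ps ++ [p]) p.1) = pvSpec (ps ++ [p]) := by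
  have hxsnd : (PySem.List.dedup (ps.map (·.1))).Nodup := by
    simp only [PySem.List.dedup_eq_ofList]; exact PySem.Set.nodup_ofList _
  apply PySem.Dict.ext
  by_cases hA : p.1 ∈ PySem.List.dedup (ps.map (·.1))
  · rw [show ((pvSpec ps).insert p.1 (pvInner (ps ++ [p]) p.1)).items =
        (pvSpec ps).items.map
          (fun q => if q.1 == p.1 then (p.1, pvInner (ps ++ [p]) p.1) else q) from
      PySem.Dict.items_insert_of_contains _ _
        (by unfold pvSpec; rw [pvContains_mk_map _ _ _ hxsnd]; simpa using hA)]
    unfold pvSpec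
    have hout : PySem.List.dedup ((ps ++ [p]).map (·.1)) = PySem.List.dedup (ps.map (·.1)) := by
      simp only [PySem.List.dedup_eq_ofList, List.map_append, List.map_singleton,
        PySem.Set.ofList_append_singleton]
      exact PySem.Set.add_of_mem (by rw [← PySem.List.dedup_eq_ofList]; exact hA)
    rw [hout, List.map_map]
    apply List.map_congr_left
    intro a' ha'
    by_cases hac : a' = p.1
    · subst hac
      simp [Function.comp]
    · simp only [Function.comp]
      rw [if_neg (by simpa using fun h' => hac h')]
      rw [pvInner_append_of_ne ps p a' (fun h' => hac h'.symm)]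
  · rw [show ((pvSpec ps).insert p.1 (pvInner (ps ++ [p]) p.1)).items =
        (pvSpec ps).items ++ [(p.1, pvInner (ps ++ [p]) p.1)] from
      PySem.Dict.items_insert_of_not_contains _ _
        (by unfold pvSpec; rw [pvContains_mk_map _ _ _ hxsnd]; simpa using hA)]
    unfold pvSpec
    have hout : PySem.List.dedup ((ps ++ [p]).map (·.1)) =
        PySem.List.dedup (ps.map (·.1)) ++ [p.1] := by
      simp only [PySem.List.dedup_eq_ofList, List.map_append, List.map_singleton,
        PySem.Set.ofList_append_singleton]
      exact PySem.Set.add_of_not_mem (by rw [← PySem.List.dedup_eq_ofList]; exact hA)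
    rw [hout, List.map_append, List.map_singleton]
    congr 1
    apply List.map_congr_left
    intro a' ha'
    rw [pvInner_append_of_ne ps p a' (fun h' => hA (h' ▸ ha'))]

theorem pvA_char (ps : List (Int × Int)) : ps.foldl pvStepA PySem.Dict.empty = pvSpec ps := by
  induction ps using List.reverseRecOn with
  | nil => rfl
  | append_singleton ps p ih =>
    rw [List.foldl_append, List.foldl_cons, List.foldl_nil, ih]
    have hxsnd : (PySem.List.dedup (ps.map (·.1))).Nodup := by
      simp only [PySem.List.dedup_eq_ofList]; exact PySem.Set.nodup_ofList _
    have hysnd : (PySem.List.dedup ((ps.filter (fun r => r.1 == p.1)).map (·.2))).Nodup := by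
      simp only [PySem.List.dedup_eq_ofList]; exact PySem.Set.nodup_ofList _
    unfold pvStepA
    rw [show (pvSpec ps).get? p.1 =
        if p.1 ∈ PySem.List.dedup (ps.map (·.1)) then some (pvInner ps p.1) else none from
      pvGet?_mk_map _ _ _ hxsnd]
    by_cases hA : p.1 ∈ PySem.List.dedup (ps.map (·.1))
    · rw [if_pos hA]
      simp only []
      have hsz : (pvInner ps p.1).size ≠ 0 := by
        unfold pvInner
        have : p.1 ∈ ps.map (·.1) := by
          simpa [PySem.List.dedup_eq_ofList, PySem.Set.mem_ofList] using hA
        obtain ⟨r, hr, hr1⟩ := List.mem_map.mp this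
        have hbm : r.2 ∈ PySem.List.dedup ((ps.filter (fun q => q.1 == p.1)).map (·.2)) :=
          (pvMem_inner ps p.1 r.2).mpr (by rwa [show (p.1, r.2) = r from Prod.ext hr1.symm rfl])
        simp only [PySem.Dict.size, List.length_map]
        exact fun h0 => (List.ne_nil_of_mem hbm) (List.eq_nil_of_length_eq_zero h0)
      rw [if_pos hsz]
      rw [show (pvInner ps p.1).get? p.2 =
          if p.2 ∈ PySem.List.dedup ((ps.filter (fun r => r.1 == p.1)).map (·.2)) then
            some ((ps.count (p.1, p.2) : Int)) else none from
        pvGet?_mk_map _ _ _ hysnd]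
      by_cases hB : p.2 ∈ PySem.List.dedup ((ps.filter (fun r => r.1 == p.1)).map (·.2))
      · rw [if_pos hB]
        simp only []
        have hpmem : p ∈ ps := by simpa using (pvMem_inner ps p.1 p.2).mp hB
        have hc : ((ps.count (p.1, p.2) : Int)) ≠ 0 := by
          have h0 : 0 < ps.count (p.1, p.2) :=
            List.count_pos_iff.mpr (by simpa using hpmem)
          exact_mod_cast Nat.pos_iff_ne_zero.mp h0
        rw [if_pos hc]
        have hIn : (pvInner ps p.1).insert p.2 ((ps.count (p.1, p.2) : Int) + 1) =
            pvInner (ps ++ [p]) p.1 := by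
          apply PySem.Dict.ext
          rw [PySem.Dict.items_insert_of_contains _ _
            (by unfold pvInner; rw [pvContains_mk_map _ _ _ hysnd]; simpa using hB)]
          unfold pvInner
          have hin : PySem.List.dedup (((ps ++ [p]).filter (fun r => r.1 == p.1)).map (·.2)) =
              PySem.List.dedup ((ps.filter (fun r => r.1 == p.1)).map (·.2)) := by
            simp only [List.filter_append, List.filter_singleton, beq_self_eq_true, cond_true,
              List.map_append, List.map_singleton, PySem.List.dedup_eq_ofList,
              PySem.Set.ofList_append_singleton]
            exact PySem.Set.add_of_mem (by rw [← PySem.List.dedup_eq_ofList]; exact hB)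
          rw [hin, List.map_map]
          apply List.map_congr_left
          intro b' hb'
          by_cases hbc : b' = p.2
          · subst hbc
            simp only [Function.comp, beq_self_eq_true, if_pos]
            have hcnt : (ps ++ [p]).count (p.1, p.2) = ps.count (p.1, p.2) + 1 := by
              rw [List.count_append]
              simp
            rw [hcnt]
            push_cast
            rfl
          · simp only [Function.comp]
            rw [if_neg (by simpa using hbc)]
            have hcnt : (ps ++ [p]).count (p.1, b') = ps.count (p.1, b') := by
              rw [List.count_append, List.count_singleton,
                if_neg (by simp only [beq_iff_eq]; exact fun h' => hbc (congrArg Prod.snd h').symm)]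
              simp
            rw [hcnt]
        rw [hIn]
        exact pvSpec_insert ps p
      · rw [if_neg hB]
        simp only []
        have hpnot : p ∉ ps :=
          fun hp => hB ((pvMem_inner ps p.1 p.2).mpr (by rwa [Prod.mk.eta]))
        have hIn2 : (pvInner ps p.1).insert p.2 1 = pvInner (ps ++ [p]) p.1 := by
          apply PySem.Dict.ext
          rw [PySem.Dict.items_insert_of_not_contains _ _
            (by unfold pvInner; rw [pvContains_mk_map _ _ _ hysnd]; simpa using hB)]
          unfold pvInner
          have hin : PySem.List.dedup (((ps ++ [p]).filter (fun r => r.1 == p.1)).map (·.2)) =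
              PySem.List.dedup ((ps.filter (fun r => r.1 == p.1)).map (·.2)) ++ [p.2] := by
            simp only [List.filter_append, List.filter_singleton, beq_self_eq_true, cond_true,
              List.map_append, List.map_singleton, PySem.List.dedup_eq_ofList,
              PySem.Set.ofList_append_singleton]
            exact PySem.Set.add_of_not_mem (by rw [← PySem.List.dedup_eq_ofList]; exact hB)
          rw [hin, List.map_append, List.map_singleton]
          congr 1
          · apply List.map_congr_left
            intro b' hb'
            have hbc : b' ≠ p.2 := fun h' => hB (h' ▸ hb')
            have hcnt : (ps ++ [p]).count (p.1, b') = ps.count (p.1, b') := by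
              rw [List.count_append, List.count_singleton,
                if_neg (by simp only [beq_iff_eq]; exact fun h' => hbc (congrArg Prod.snd h').symm)]
              simp
            rw [hcnt]
          · have hcnt : (ps ++ [p]).count (p.1, p.2) = 1 := by
              rw [List.count_append, List.count_eq_zero.mpr (by simpa using hpnot)]
              simp
            simp [hcnt]
        rw [hIn2]
        exact pvSpec_insert ps p
    · rw [if_neg hA]
      simp only []
      have hpfst : p.1 ∉ ps.map (·.1) := by
        simpa [PySem.List.dedup_eq_ofList, PySem.Set.mem_ofList] using hA
      have hofl : (PySem.Dict.ofList [(p.2, 1)] : PySem.Dict Int Int) =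
          pvInner (ps ++ [p]) p.1 := by
        apply PySem.Dict.ext
        unfold pvInner
        have hfq : ps.filter (fun r => r.1 == p.1) = [] := by
          rw [List.filter_eq_nil_iff]
          intro r hr
          simp only [beq_iff_eq]
          exact fun h1 => hpfst (h1 ▸ List.mem_map_of_mem hr)
        have hc0 : ps.count (p.1, p.2) = 0 := List.count_eq_zero.mpr (by
          intro hp
          have hp' : p ∈ ps := by simpa using hp
          exact hpfst (List.mem_map_of_mem hp'))
        simp only [List.filter_append, List.filter_singleton, hfq, beq_self_eq_true, cond_true,
          List.nil_append, PySem.List.dedup_eq_ofList]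
        rw [show (PySem.Dict.ofList [(p.2, (1 : Int))] : PySem.Dict Int Int).items =
          [(p.2, (1 : Int))] from rfl]
        rw [show PySem.Set.ofList (List.map (fun x => x.2) [p]) = [p.2] from rfl]
        simp [hc0]
      rw [hofl]
      exact pvSpec_insert ps p

theorem pvDedup_filter_fst (ps : List (Int × Int)) (a : Int) :
    ((PySem.List.dedup ps).filter (fun k => k.1 == a)).map (·.2) =
      PySem.List.dedup ((ps.filter (fun p => p.1 == a)).map (·.2)) := by
  simp only [PySem.List.dedup_eq_ofList]
  induction ps using List.reverseRecOn with
  | nil => rfl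
  | append_singleton l p ih =>
    by_cases hpa : p.1 = a
    · have hfa : (l ++ [p]).filter (fun q => q.1 == a) = l.filter (fun q => q.1 == a) ++ [p] := by
        simp [List.filter_append, hpa]
      by_cases hp : p ∈ l
      · rw [PySem.Set.ofList_append_singleton,
          PySem.Set.add_of_mem (by simpa [PySem.Set.mem_ofList] using hp), ih, hfa,
          List.map_append, List.map_singleton, PySem.Set.ofList_append_singleton,
          PySem.Set.add_of_mem]
        simp only [PySem.Set.mem_ofList, List.mem_map, List.mem_filter, beq_iff_eq]
        exact ⟨p, ⟨hp, hpa⟩, rfl⟩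
      · rw [PySem.Set.ofList_append_singleton,
          PySem.Set.add_of_not_mem (by simpa [PySem.Set.mem_ofList] using hp),
          List.filter_append, List.filter_singleton, hfa]
        simp only [hpa, beq_self_eq_true, cond_true]
        rw [List.map_append, List.map_append, List.map_singleton,
          PySem.Set.ofList_append_singleton, ih, PySem.Set.add_of_not_mem]
        simp only [PySem.Set.mem_ofList, List.mem_map, List.mem_filter, beq_iff_eq, not_exists]
        rintro q ⟨⟨hq, hq1⟩, hq2⟩
        exact hp (by rwa [show p = q from Prod.ext (hpa.trans hq1.symm) hq2.symm])
    · have hfn : (l ++ [p]).filter (fun q => q.1 == a) = l.filter (fun q => q.1 == a) := by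
        simp [List.filter_append, hpa]
      by_cases hp : p ∈ l
      · rw [PySem.Set.ofList_append_singleton,
          PySem.Set.add_of_mem (by simpa [PySem.Set.mem_ofList] using hp), ih, hfn]
      · rw [PySem.Set.ofList_append_singleton,
          PySem.Set.add_of_not_mem (by simpa [PySem.Set.mem_ofList] using hp), hfn,
          List.filter_append, List.filter_singleton]
        simp only [show (p.1 == a) = false by simpa using hpa, cond_false, List.append_nil]
        exact ih

theorem pvA_eq (mat : List (List Int)) :
    CalcOccu mat = ((pvPairs mat).foldl pvStepA PySem.Dict.empty).items.map
      (fun p => (p.1, p.2.items)) := by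
  unfold CalcOccu pvPairs
  rw [List.foldl_flatMap]
  simp only [List.foldl_map]
  rfl

-- the comparator Python's tuple sort uses, and the order it leaves behind
def pvLt (a b : Int × Int) : Bool :=
  decide (a.1 < b.1) || (!decide (b.1 < a.1) && decide (a.2 < b.2))

def pvR (a b : Int × Int) : Prop := pvLt b a = false

theorem pvLt_trans {a b c : Int × Int} (h1 : pvLt a b = true) (h2 : pvLt b c = true) :
    pvLt a c = true := by
  simp [pvLt] at h1 h2 ⊢
  omega

theorem pvLt_asymm {a b : Int × Int} (h : pvLt a b = true) : pvLt b a = false := by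
  simp [pvLt] at h ⊢
  omega

theorem pvLt_eq {a b : Int × Int} (h1 : pvLt a b = false) (h2 : pvLt b a = false) : a = b := by
  simp [pvLt] at h1 h2
  exact Prod.ext (by omega) (by omega)

theorem pvInsertBy_pairwise (x : Int × Int) (l : List (Int × Int)) (h : l.Pairwise pvR) :
    (PySem.List.insertBy pvLt x l).Pairwise pvR := by
  induction l with
  | nil => simp [PySem.List.insertBy, pvR]
  | cons y ys ih =>
    rcases List.pairwise_cons.mp h with ⟨hy, hys⟩
    by_cases hxy : pvLt x y = true
    · rw [show PySem.List.insertBy pvLt x (y :: ys) = x :: y :: ys from by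
        simp [PySem.List.insertBy, hxy]]
      refine List.pairwise_cons.mpr ⟨?_, h⟩
      intro z hz
      rcases List.mem_cons.mp hz with rfl | hz'
      · exact pvLt_asymm hxy
      · cases hzx : pvLt z x with
        | false => exact hzx
        | true =>
          have : pvLt z y = true := pvLt_trans hzx hxy
          rw [hy z hz'] at this
          exact absurd this (by simp)
    · rw [show PySem.List.insertBy pvLt x (y :: ys) = y :: PySem.List.insertBy pvLt x ys from by
        simp [PySem.List.insertBy, hxy]]
      refine List.pairwise_cons.mpr ⟨?_, ih hys⟩
      intro z hz
      rcases (PySem.List.mem_insertBy _ _ _ _).mp hz with rfl | hz'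
      · simpa [pvR] using hxy
      · exact hy z hz'

theorem pvFoldl_insertBy_pairwise (l : List (Int × Int)) (acc : List (Int × Int))
    (h : acc.Pairwise pvR) :
    (l.foldl (fun acc x => PySem.List.insertBy pvLt x acc) acc).Pairwise pvR := by
  induction l generalizing acc with
  | nil => exact h
  | cons x xs ih => exact ih _ (pvInsertBy_pairwise x acc h)

theorem pvSorted2_pairwise (ps : List (Int × Int)) :
    (PySem.List.sorted2 ps (fun p => p.1) (fun p => p.2) false).Pairwise pvR :=
  pvFoldl_insertBy_pairwise ps [] (by simp)

-- run-length encoding of a pvR-sorted list reads off the multiset counts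
theorem pvRunLenAux_get? (n : Nat) (l : List (Int × Int)) (hn : l.length ≤ n)
    (hp : l.Pairwise pvR) (acc : PySem.Dict (Int × Int) Int) (q : Int × Int) :
    (pvRunLenAux acc l).get? q =
      if q ∈ l then some ((l.count q : Int)) else acc.get? q := by
  induction n generalizing l acc with
  | zero =>
    rw [show l = [] from List.eq_nil_of_length_eq_zero (Nat.le_zero.mp hn)]
    simp [pvRunLenAux]
  | succ n ih =>
    cases l with
    | nil => simp [pvRunLenAux]
    | cons x xs =>
      rcases List.pairwise_cons.mp hp with ⟨hx, hxs⟩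
      set run := xs.takeWhile (fun y => y == x) with hrun
      set rest := xs.dropWhile (fun y => y == x) with hrest
      have hsplit : run ++ rest = xs := List.takeWhile_append_dropWhile
      have hrunx : ∀ y ∈ run, y = x := fun y hy => by
        simpa using List.mem_takeWhile_imp hy
      have hrestp : rest.Pairwise pvR := List.Pairwise.sublist (List.dropWhile_sublist _) hxs
      have hxrest : x ∉ rest := by
        intro hxm
        rcases hdw : rest with _ | ⟨d, t⟩
        · rw [hdw] at hxm; exact absurd hxm List.not_mem_nil
        · have hdx' : d ≠ x := by
            have h0 := List.head?_dropWhile_not (fun y => y == x) xs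
            rw [← hrest, hdw] at h0
            simpa using h0
          have hdxs : d ∈ xs := (List.dropWhile_sublist _).mem (by rw [← hrest, hdw]; simp)
          have hRxd : pvLt d x = false := hx _ hdxs
          rw [hdw] at hxm hrestp
          rcases List.mem_cons.mp hxm with hxd | hxt
          · exact hdx' hxd.symm
          · have hRdx : pvLt x d = false := (List.pairwise_cons.mp hrestp).1 x hxt
            exact hdx' (pvLt_eq hRxd hRdx)
      have hstep : pvRunLenAux acc (x :: xs) =
          pvRunLenAux (acc.insert x (((run.length : Int)) + 1)) rest := by
        rw [pvRunLenAux]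
      have hlen : rest.length ≤ n := by
        have h1 : rest.length ≤ xs.length := by
          rw [hrest]; exact List.length_dropWhile_le _ _
        have h2 : xs.length ≤ n := by simpa using Nat.le_of_succ_le_succ hn
        omega
      rw [hstep, ih rest hlen hrestp]
      by_cases hq : q = x
      · subst hq
        rw [if_neg hxrest, PySem.Dict.get?_insert_self, if_pos (List.mem_cons_self)]
        have hcr : run.count q = run.length := List.count_eq_length.mpr
          (fun y hy => ((hrunx y hy).symm : q = y))
        have hc0 : rest.count q = 0 := List.count_eq_zero.mpr hxrest
        rw [show List.count q (q :: xs) = List.count q xs + 1 from List.count_cons_self,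
          ← hsplit, List.count_append, hcr, hc0]
        push_cast
        ring_nf
      · have hqrun : q ∉ run := fun hm => hq (hrunx q hm)
        have hcxs : (x :: xs).count q = rest.count q := by
          rw [List.count_cons_of_ne (Ne.symm hq), ← hsplit, List.count_append,
            List.count_eq_zero.mpr hqrun]
          omega
        by_cases hqr : q ∈ rest
        · rw [if_pos hqr, if_pos (by
            apply List.mem_cons_of_mem
            rw [← hsplit]
            exact List.mem_append_right _ hqr), hcxs]
        · rw [if_neg hqr, if_neg (by
            intro hm
            rcases List.mem_cons.mp hm with h' | h'
            · exact hq h'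
            · rw [← hsplit] at h'
              rcases List.mem_append.mp h' with h'' | h''
              · exact hqrun h''
              · exact hqr h''),
            PySem.Dict.get?_insert_of_ne _ _ hq]

theorem pvCounts_getD (ps : List (Int × Int)) (p : Int × Int) (hp : p ∈ ps) :
    (pvRunLenAux PySem.Dict.empty
        (PySem.List.sorted2 ps (fun r => r.1) (fun r => r.2) false)).getD p 0 =
      ((ps.count p : Int)) := by
  have hperm := PySem.List.sorted2_perm ps (fun r => r.1) (fun r => r.2) false
  rw [PySem.Dict.getD_eq_get?_getD,
    pvRunLenAux_get? _ _ (Nat.le_refl _) (pvSorted2_pairwise ps),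
    if_pos (hperm.mem_iff.mpr hp), hperm.count_eq]
  rfl

-- the reshape loop over a nodup key list builds the grouped nested dict
def pvStepR (result : PySem.Dict Int (PySem.Dict Int Int)) (q : (Int × Int) × Int) :
    PySem.Dict Int (PySem.Dict Int Int) :=
  result.insert q.1.1 (((result.get? q.1.1).getD PySem.Dict.empty).insert q.1.2 q.2)

theorem pvReshape_char (L : List ((Int × Int) × Int)) (h : (L.map (·.1)).Nodup) :
    L.foldl pvStepR PySem.Dict.empty =
      ⟨(PySem.List.dedup (L.map (·.1.1))).map (fun a =>
        (a, ⟨(L.filter (fun q => q.1.1 == a)).map (fun q => (q.1.2, q.2))⟩))⟩ := by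
  induction L using List.reverseRecOn with
  | nil => rfl
  | append_singleton L q ih =>
    have h2 : ((L.map (·.1)) ++ [q.1]).Nodup := by simpa using h
    have hnd : (L.map (·.1)).Nodup := (List.nodup_append.mp h2).1
    have hq1 : q.1 ∉ L.map (·.1) := by
      intro hmem
      exact (List.nodup_append.mp h2).2.2 q.1 hmem q.1 (List.mem_singleton_self _) rfl
    have hxsnd : (PySem.List.dedup (L.map (·.1.1))).Nodup := by
      simp only [PySem.List.dedup_eq_ofList]; exact PySem.Set.nodup_ofList _
    rw [List.foldl_append, List.foldl_cons, List.foldl_nil, ih hnd]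
    set xs := PySem.List.dedup (L.map (·.1.1)) with hxs
    set g : Int → PySem.Dict Int Int :=
      fun a => ⟨(L.filter (fun q => q.1.1 == a)).map (fun q => (q.1.2, q.2))⟩ with hg
    unfold pvStepR
    rw [pvGet?_mk_map xs g q.1.1 hxsnd]
    by_cases hA : q.1.1 ∈ xs
    · rw [if_pos hA]
      simp only [Option.getD_some]
      have hinc : (g q.1.1).contains q.1.2 = false := by
        rw [hg, PySem.Dict.contains_mk, List.any_eq_false]
        rintro p hp
        simp only [List.mem_map, List.mem_filter, beq_iff_eq] at hp
        obtain ⟨r, ⟨hr, hr1⟩, rfl⟩ := hp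
        intro hb
        simp only [beq_iff_eq] at hb
        exact hq1 ((Prod.ext hr1 hb) ▸ List.mem_map_of_mem hr)
      have hins : (g q.1.1).insert q.1.2 q.2 =
          ⟨(L.filter (fun r => r.1.1 == q.1.1)).map (fun r => (r.1.2, r.2)) ++ [(q.1.2, q.2)]⟩ := by
        apply PySem.Dict.ext
        rw [PySem.Dict.items_insert_of_not_contains _ _ hinc]
      rw [hins]
      apply PySem.Dict.ext
      rw [PySem.Dict.items_insert_of_contains _ _
        (by rw [pvContains_mk_map xs g q.1.1 hxsnd]; simpa using hA)]
      have hxs' : PySem.List.dedup ((L ++ [q]).map (·.1.1)) = xs := by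
        rw [hxs]
        simp only [PySem.List.dedup_eq_ofList, List.map_append, List.map_singleton,
          PySem.Set.ofList_append_singleton]
        exact PySem.Set.add_of_mem (by rw [← PySem.List.dedup_eq_ofList]; exact hA)
      rw [hxs', List.map_map]
      apply List.map_congr_left
      intro a' ha'
      by_cases hac : a' = q.1.1
      · subst hac
        simp only [Function.comp, beq_self_eq_true, if_pos]
        simp [List.filter_append]
      · have hne : (q.1.1 == a') = false := by
          simp only [beq_eq_false_iff_ne, ne_eq]
          exact fun h' => hac h'.symm
        simp only [Function.comp]
        rw [if_neg (by simpa using hac)]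
        simp [List.filter_append, hne]
    · rw [if_neg hA]
      simp only [Option.getD_none]
      have hempty : (PySem.Dict.empty : PySem.Dict Int Int).insert q.1.2 q.2 =
          ⟨[(q.1.2, q.2)]⟩ := rfl
      rw [hempty]
      apply PySem.Dict.ext
      rw [PySem.Dict.items_insert_of_not_contains _ _
        (by rw [pvContains_mk_map xs g q.1.1 hxsnd]; simpa using hA)]
      have hxs' : PySem.List.dedup ((L ++ [q]).map (·.1.1)) = xs ++ [q.1.1] := by
        rw [hxs]
        simp only [PySem.List.dedup_eq_ofList, List.map_append, List.map_singleton,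
          PySem.Set.ofList_append_singleton]
        exact PySem.Set.add_of_not_mem (by rw [← PySem.List.dedup_eq_ofList]; exact hA)
      rw [hxs', List.map_append, List.map_singleton]
      have hfq : L.filter (fun r => r.1.1 == q.1.1) = [] := by
        rw [List.filter_eq_nil_iff]
        intro r hr
        simp only [beq_iff_eq]
        intro h1
        exact hA (by
          rw [hxs]
          simp only [PySem.List.dedup_eq_ofList, PySem.Set.mem_ofList]
          exact List.mem_map.mpr ⟨r, hr, h1⟩)
      congr 1
      · apply List.map_congr_left
        intro a' ha'
        have hne : (q.1.1 == a') = false := by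
          simp only [beq_eq_false_iff_ne, ne_eq]
          exact fun h' => hA (h' ▸ ha')
        simp [List.filter_append, hne]
      · simp [List.filter_append, hfq]

theorem pvDedup_map_dedup {α β : Type} [BEq α] [LawfulBEq α] [BEq β] [LawfulBEq β]
    (l : List α) (f : α → β) :
    PySem.List.dedup ((PySem.List.dedup l).map f) = PySem.List.dedup (l.map f) := by
  simp only [PySem.List.dedup_eq_ofList]
  induction l using List.reverseRecOn with
  | nil => rfl
  | append_singleton l x ih =>
    rw [PySem.Set.ofList_append_singleton, List.map_append, List.map_singleton,
      PySem.Set.ofList_append_singleton]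
    by_cases hx : x ∈ l
    · rw [PySem.Set.add_of_mem (by simpa [PySem.Set.mem_ofList] using hx), ih,
        PySem.Set.add_of_mem (by simp [PySem.Set.mem_ofList]; exact ⟨x, hx, rfl⟩)]
    · rw [PySem.Set.add_of_not_mem (by simpa [PySem.Set.mem_ofList] using hx),
        List.map_append, List.map_singleton, PySem.Set.ofList_append_singleton, ih]

theorem pvMap_fst_pair (l : List (Int × Int)) (v : Int × Int → Int) :
    ((l.map (fun k => (k, v k))).map (·.1)) = l := by
  rw [List.map_map]
  exact List.map_id _

theorem pvReshapeDedup (ps : List (Int × Int)) (v : Int × Int → Int)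
    (hv : ∀ p ∈ ps, v p = ((ps.count p : Int))) :
    (((PySem.List.dedup ps).map (fun k => (k, v k))).foldl pvStepR PySem.Dict.empty).items.map
        (fun q => (q.1, q.2.items)) =
      (pvSpec ps).items.map (fun p => (p.1, p.2.items)) := by
  have hksnd : (PySem.List.dedup ps).Nodup := by
    simp only [PySem.List.dedup_eq_ofList]; exact PySem.Set.nodup_ofList _
  rw [pvReshape_char _ (by rw [pvMap_fst_pair]; exact hksnd)]
  have hout : PySem.List.dedup (((PySem.List.dedup ps).map (fun k => (k, v k))).map (·.1.1)) =
      PySem.List.dedup (ps.map (·.1)) := by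
    rw [List.map_map,
      show ((·.1.1 : (Int × Int) × Int → Int) ∘ (fun k => (k, v k))) =
        (·.1 : Int × Int → Int) from rfl]
    exact pvDedup_map_dedup ps _
  rw [hout]
  unfold pvSpec
  simp only [List.map_map]
  apply List.map_congr_left
  intro a ha
  simp only [Function.comp]
  congr 1
  rw [List.filter_map, List.map_map,
    show ((fun (q : (Int × Int) × Int) => q.1.1 == a) ∘ (fun k => (k, v k))) =
      (fun (k : Int × Int) => k.1 == a) from rfl,
    show (((fun (q : (Int × Int) × Int) => (q.1.2, q.2))) ∘ (fun k => (k, v k))) =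
      (fun (k : Int × Int) => (k.2, v k)) from rfl]
  have hcong : ∀ k ∈ (PySem.List.dedup ps).filter (fun k => k.1 == a),
      (fun (k : Int × Int) => (k.2, v k)) k =
        (fun (k : Int × Int) => (k.2, ((ps.count (a, k.2) : Int)))) k := by
    intro k hk
    have hk1 : k.1 = a := by simpa using (List.mem_filter.mp hk).2
    have hkps : k ∈ ps := by
      have := (List.mem_filter.mp hk).1
      simpa [PySem.List.dedup_eq_ofList, PySem.Set.mem_ofList] using this
    simp only []
    rw [hv k hkps, show ((a, k.2) : Int × Int) = k from Prod.ext hk1.symm rfl]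
  rw [List.map_congr_left hcong,
    show ((PySem.List.dedup ps).filter (fun k => k.1 == a)).map
        (fun (k : Int × Int) => (k.2, ((ps.count (a, k.2) : Int)))) =
      (((PySem.List.dedup ps).filter (fun k => k.1 == a)).map (·.2)).map
        (fun b => (b, ((ps.count (a, b) : Int)))) from by rw [List.map_map]; rfl,
    pvDedup_filter_fst]
  rfl

theorem pvB_eq (mat : List (List Int)) :
    CalcOccu_alt mat = (pvSpec (pvPairs mat)).items.map (fun p => (p.1, p.2.items)) := by
  have hstep : CalcOccu_alt mat =
      (((PySem.List.dedup (pvPairs mat)).map (fun k => (k,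
          (pvRunLenAux PySem.Dict.empty
            (PySem.List.sorted2 (pvPairs mat) (fun p => p.1) (fun p => p.2) false)).getD k 0))).foldl
        pvStepR PySem.Dict.empty).items.map (fun q => (q.1, q.2.items)) := by
    simp only [CalcOccu_alt, pvPairs, List.foldl_map]
    rfl
  rw [hstep]
  exact pvReshapeDedup _ _ (fun p hp => pvCounts_getD (pvPairs mat) p hp)

-- ===== VERDICT (by name: the statement is the Claim_ definition above) =====
theorem CalcOccu_spec : Claim_equal_CalcOccu := by
  intro mat _ _
  unfold Spec_CalcOccu
  rw [pvA_eq, pvB_eq, pvA_char]
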